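-- pv_equiv track=rewrite | github.com/dhruvbhargav08/DSA | Geek_hates_too_many_1s.py | noConseBits
-- ===== SOURCE A (Python) =====
-- def noConseBits(n : int) -> int:
--     # code here
--     def tobinary(num):
--         listt=[]
--         lenn=0
--         while num>0:
--             listt.append(num%2)
--             lenn+=1
--             num//=2
--         return listt[::-1],lenn
--     def todecimal(listt,N):
--         res=0
--         temp=0
--         for i in range (N-1,-1,-1):
--             res=res+(2**temp)*listt[i]
--             temp+=1
--         return res
--     binary,lenn=tobinary(n)
--     count=0
--     for i in range (lenn):
--         if binary[i]==1:
--             count+=1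
--         if binary[i]==0:
--             count=0
--         if count==3:
--             binary[i]=0
--             count=0
--     decimal=todecimal(binary,lenn)
--     return decimal
-- ===== SOURCE B (Python) =====
-- def noConseBits(n: int) -> int:
--     # Clear every third consecutive set bit: in the binary string, every maximal
--     # run of '1's loses its 3rd, 6th, ... bit, i.e. each non-overlapping '111'
--     # (scanned left to right) becomes '110'.
--     if n <= 0:
--         return 0
--     s = format(n, 'b').replace('111', '110')
--     res = 0
--     for c in s:
--         res = 2 * res + (c == '1')
--     return res
-- ===== Notes on version B (the rewrite author's own statement) =====
-- stated objective: simpler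
-- what changed: A hand-builds the bit list with a remainder/halving loop, runs a mutating consecutive-ones counter scan, and reassembles the integer with a powers-of-two loop; B formats the number as a binary string, clears every third consecutive set bit via a single non-overlapping replace of '111' by '110', and folds the string back to an integer.
import Mathlib
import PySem

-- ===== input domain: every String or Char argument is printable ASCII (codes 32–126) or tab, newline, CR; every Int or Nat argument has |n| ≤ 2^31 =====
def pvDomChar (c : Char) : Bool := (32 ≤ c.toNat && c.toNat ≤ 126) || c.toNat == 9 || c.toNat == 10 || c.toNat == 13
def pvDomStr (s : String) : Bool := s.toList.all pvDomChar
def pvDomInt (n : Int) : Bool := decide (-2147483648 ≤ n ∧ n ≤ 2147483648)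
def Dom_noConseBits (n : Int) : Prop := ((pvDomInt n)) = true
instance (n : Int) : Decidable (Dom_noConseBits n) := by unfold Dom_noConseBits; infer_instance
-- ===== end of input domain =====

-- B replaces A's hand-rolled binary conversion and counter scan by: format(n,'b'),
-- one string replace('111','110') (clearing every 3rd consecutive one), and one
-- accumulating fold back to an integer; objective: simpler.


-- ===== PORT A =====
-- while num>0: listt.append(num%2); lenn+=1; num//=2   … then `return listt[::-1], lenn`
def pyA_tobinGo (num : Int) (listt : List Int) (lenn : Int) : List Int × Int :=
  if h : 0 < num then
    pyA_tobinGo (PySem.Int.floordiv num 2) (listt ++ [PySem.Int.mod num 2]) (lenn + 1)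
  else (listt.reverse, lenn)
termination_by num.toNat
decreasing_by
  rw [PySem.Int.floordiv_eq_ediv_of_pos (by omega)]; omega

-- for i in range(N-1,-1,-1): res = res+(2**temp)*listt[i]; temp += 1
-- (2**temp is ported as 2 ^ temp.toNat — temp is always ≥ 0 here;
--  listt[i] is always in range in A, so the .getD 0 default is never used)
def pyA_todecGo (listt : List Int) (i res temp : Int) : Int :=
  if h : -1 < i then
    pyA_todecGo listt (i - 1) (res + 2 ^ temp.toNat * ((PySem.List.pyGet? listt i).getD 0)) (temp + 1)
  else res
termination_by (i + 1).toNat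
decreasing_by omega

-- the `for i in range(lenn)` counter loop, reading and rewriting binary[i]:
-- the obvious structural recursion over the same state (the list and `count`)
def pyA_scan : List Int → Int → List Int
  | [], _ => []
  | b :: rest, count =>
    let count1 := if b == 1 then count + 1 else count
    let count2 := if b == 0 then 0 else count1
    if count2 == 3 then 0 :: pyA_scan rest 0 else b :: pyA_scan rest count2

def noConseBits (n : Int) : Int :=
  let p := pyA_tobinGo n [] 0       -- binary, lenn = tobinary(n)
  let binary := pyA_scan p.1 0      -- the counter loop
  pyA_todecGo binary (p.2 - 1) 0 0  -- todecimal(binary, lenn)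

-- ===== PORT B =====
-- format(n,'b') = PySem.Int.toBinChars, .replace('111','110') = PySem.Chars.replace
-- (string work done on the List Char side), then the accumulating for-c-in-s fold.
def noConseBits_alt (n : Int) : Int :=
  if n ≤ 0 then 0
  else
    (PySem.Chars.replace (PySem.Int.toBinChars n) ['1', '1', '1'] ['1', '1', '0']).foldl
      (fun res c => 2 * res + (if c == '1' then 1 else 0)) 0

-- ===== PRECONDITION & SPEC =====
def Spec_noConseBits (n : Int) (out : Int) : Prop := out = noConseBits_alt n
instance (n : Int) (out : Int) : Decidable (Spec_noConseBits n out) := by unfold Spec_noConseBits; infer_instance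

-- ===== CLAIM (what is proved, stated in full; the proofs are below) =====
def Claim_equal_noConseBits : Prop := ∀ (n : Int), Dom_noConseBits n → Spec_noConseBits n (noConseBits n)

-- ===== LEMMAS AND PROOFS =====

-- the MSB-first bit list of n (0/1 entries), the common reference of both ports
def msbBits (m : Nat) : List Int :=
  if m = 0 then [] else msbBits (m / 2) ++ [((m % 2 : Nat) : Int)]
decreasing_by exact Nat.div_lt_self (by omega) (by omega)

def charsOf (bs : List Int) : List Char := bs.map (fun b => if b == 1 then '1' else '0')

-- proof-side model of replace('111','110')
def rep : List Char → List Char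
  | [] => []
  | c :: t =>
    if ['1', '1', '1'].isPrefixOf (c :: t) then '1' :: '1' :: '0' :: rep (t.drop 2)
    else c :: rep t
termination_by l => l.length
decreasing_by
  all_goals simp

lemma msbBits_succ (m : Nat) (hm : m ≠ 0) :
    msbBits m = msbBits (m / 2) ++ [((m % 2 : Nat) : Int)] := by
  rw [msbBits]; simp [hm]

lemma tobinGo_eq (num : Int) : ∀ (listt : List Int) (lenn : Int),
    pyA_tobinGo num listt lenn
      = ((listt ++ (msbBits num.toNat).reverse).reverse,
         lenn + ((msbBits num.toNat).length : Int)) := by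
  induction hm : num.toNat using Nat.strong_induction_on generalizing num with
  | _ m ih =>
  subst hm
  intro listt lenn
  by_cases h : 0 < num
  · rw [pyA_tobinGo]
    simp only [h, dif_pos]
    have h2 : (PySem.Int.floordiv num 2).toNat = num.toNat / 2 := by
      rw [PySem.Int.floordiv_eq_ediv_of_pos (by omega)]; omega
    have hlt : (PySem.Int.floordiv num 2).toNat < num.toNat := by rw [h2]; omega
    rw [ih _ hlt _ rfl]
    have h3 : PySem.Int.mod num 2 = ((num.toNat % 2 : Nat) : Int) := by
      rw [PySem.Int.mod_eq_emod_of_pos (by omega)]; omega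
    rw [h2, h3, msbBits_succ num.toNat (by omega)]
    simp
    omega
  · rw [pyA_tobinGo]
    have : num.toNat = 0 := by omega
    rw [this, msbBits]
    simp [h]

lemma scan_length (bs : List Int) : ∀ (c : Int), (pyA_scan bs c).length = bs.length := by
  induction bs with
  | nil => intro c; simp [pyA_scan]
  | cons b rest ih =>
    intro c
    simp only [pyA_scan]
    repeat' split
    all_goals simp [ih]

lemma scan_bits (bs : List Int) (h : ∀ b ∈ bs, b = 0 ∨ b = 1) :
    ∀ (c : Int), ∀ b ∈ pyA_scan bs c, b = 0 ∨ b = 1 := by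
  induction bs with
  | nil => intro c b hb; simp [pyA_scan] at hb
  | cons b0 rest ih =>
    intro c b hb
    have h0 := h b0 (by simp)
    have hr : ∀ b ∈ rest, b = 0 ∨ b = 1 := fun x hx => h x (by simp [hx])
    simp only [pyA_scan] at hb
    repeat' split at hb
    all_goals
      rcases List.mem_cons.mp hb with rfl | hbm
      <;> first | (left; rfl) | exact h0 | exact ih hr _ _ hbm

lemma msbBits_bits (m : Nat) : ∀ b ∈ msbBits m, b = 0 ∨ b = 1 := by
  induction m using msbBits.induct with
  | case1 => rw [msbBits]; simp
  | case2 m hm ih =>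
    rw [msbBits_succ m hm]
    intro b hb
    rcases List.mem_append.mp hb with h1 | h2
    · exact ih b h1
    · simp at h2; omega

def valI (bs : List Int) : Int := bs.foldl (fun a b => 2 * a + b) 0

lemma valI_append (l : List Int) (b : Int) : valI (l ++ [b]) = 2 * valI l + b := by
  simp [valI]

lemma todecGo_eq (bs : List Int) : ∀ (i : Nat), i ≤ bs.length → ∀ (res : Int) (temp : Nat),
    pyA_todecGo bs ((i : Int) - 1) res (temp : Int)
      = res + 2 ^ temp * valI (bs.take i) := by
  intro i
  induction i generalizing bs with
  | zero => intro _ res temp; rw [pyA_todecGo]; simp [valI]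
  | succ i ih =>
    intro hle res temp
    have hi : i < bs.length := by omega
    have ecast : (((i + 1 : Nat)) : Int) - 1 = ((i : Nat) : Int) := by push_cast; ring
    rw [ecast, pyA_todecGo]
    rw [dif_pos (show (-1 : Int) < (i : Nat) by omega)]
    have e2 : ((temp : Nat) : Int).toNat = temp := by simp
    have e3 : ((temp : Nat) : Int) + 1 = ((temp + 1 : Nat) : Int) := by norm_num
    have e4 : (PySem.List.pyGet? bs ((i : Nat) : Int)).getD 0 = bs[i] := by
      rw [PySem.List.pyGet?_natCast]
      simp [hi]
    rw [e4, e2, e3, ih bs (by omega)]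
    have e6 : bs.take (i + 1) = bs.take i ++ [bs[i]] := by
      rw [List.take_add_one]; simp [hi]
    rw [e6, valI_append]
    ring

lemma toDigitsCore_eq (fuel : Nat) : ∀ (m : Nat), 0 < m → m ≤ fuel → ∀ (acc : List Char),
    Nat.toDigitsCore 2 fuel m acc = charsOf (msbBits m) ++ acc := by
  induction fuel with
  | zero => intro m h1 h2; omega
  | succ fuel ih =>
    intro m h1 h2 acc
    rw [Nat.toDigitsCore]
    by_cases hz : m / 2 = 0
    · have hm1 : m = 1 := by omega
      subst hm1
      simp [charsOf, msbBits_succ 1 (by omega), msbBits]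
      decide
    · rw [if_neg hz, ih (m / 2) (by omega) (by omega)]
      rw [msbBits_succ m (by omega)]
      have : (m % 2).digitChar = (if ((m % 2 : Nat) : Int) == 1 then '1' else '0') := by
        have : m % 2 = 0 ∨ m % 2 = 1 := by omega
        rcases this with h | h <;> rw [h] <;> rfl
      simp [charsOf, this]

lemma toBinChars_eq (n : Int) (h : 0 < n) :
    PySem.Int.toBinChars n = charsOf (msbBits n.toNat) := by
  rw [PySem.Int.toBinChars]
  rw [if_neg (by omega)]
  rw [Nat.toDigits]
  rw [toDigitsCore_eq (n.toNat + 1) n.toNat (by omega) (by omega) []]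
  simp

lemma replace_go_eq (fuel : Nat) : ∀ (l acc : List Char), l.length ≤ fuel →
    PySem.Chars.replace.go ['1', '1', '1'] ['1', '1', '0'] fuel l acc = acc.reverse ++ rep l := by
  induction fuel with
  | zero =>
    intro l acc h
    have : l = [] := List.length_eq_zero_iff.mp (by omega)
    subst this
    rw [PySem.Chars.replace.go, rep]
  | succ fuel ih =>
    intro l acc h
    rcases l with _ | ⟨c, t⟩
    · rw [PySem.Chars.replace.go, rep]
      all_goals simp
    · rw [PySem.Chars.replace.go, rep]
      by_cases hp : List.isPrefixOf ['1', '1', '1'] (c :: t) = true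
      · rw [if_pos hp, if_pos hp]
        rcases t with _ | ⟨c2, t2⟩; · simp [List.isPrefixOf] at hp
        rcases t2 with _ | ⟨c3, t3⟩; · simp [List.isPrefixOf] at hp
        rw [ih _ _ (by simp at h ⊢; omega)]
        simp
      · rw [if_neg hp, if_neg hp]
        rw [ih _ _ (by simp at h ⊢; omega)]
        simp

lemma replace_eq (l : List Char) :
    PySem.Chars.replace l ['1', '1', '1'] ['1', '1', '0'] = rep l := by
  rw [PySem.Chars.replace]
  simp only [List.isEmpty_cons, if_false, Bool.false_eq_true]
  exact replace_go_eq l.length l [] le_rfl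

lemma rep_eq_scan (bs : List Int) (h : ∀ b ∈ bs, b = 0 ∨ b = 1) :
    rep (charsOf bs) = charsOf (pyA_scan bs 0) := by
  induction hn : bs.length using Nat.strong_induction_on generalizing bs with
  | _ n ih =>
  subst hn
  rcases bs with _ | ⟨b, t⟩
  · simp [charsOf, pyA_scan, rep]
  have hb := h b (by simp)
  have ht : ∀ x ∈ t, x = 0 ∨ x = 1 := fun x hx => h x (by simp [hx])
  rcases hb with rfl | rfl
  · -- 0 :: t
    have IH := ih t.length (by simp) t ht rfl
    simp only [charsOf] at IH ⊢
    simp [pyA_scan, rep, List.isPrefixOf]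
    simpa using IH
  -- 1 :: t
  rcases t with _ | ⟨b2, t2⟩
  · simp [charsOf, pyA_scan, rep, List.isPrefixOf]
  have hb2 := ht b2 (by simp)
  have ht2 : ∀ x ∈ t2, x = 0 ∨ x = 1 := fun x hx => ht x (by simp [hx])
  rcases hb2 with rfl | rfl
  · -- 1 :: 0 :: t2
    have IH := ih t2.length (by simp) t2 ht2 rfl
    simp only [charsOf] at IH ⊢
    simp [pyA_scan, rep, List.isPrefixOf]
    simpa using IH
  -- 1 :: 1 :: t2
  rcases t2 with _ | ⟨b3, t3⟩
  · simp [charsOf, pyA_scan, rep, List.isPrefixOf]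
  have hb3 := ht2 b3 (by simp)
  have ht3 : ∀ x ∈ t3, x = 0 ∨ x = 1 := fun x hx => ht2 x (by simp [hx])
  rcases hb3 with rfl | rfl
  · -- 1 :: 1 :: 0 :: t3
    have IH := ih t3.length (by simp; omega) t3 ht3 rfl
    simp only [charsOf] at IH ⊢
    simp [pyA_scan, rep, List.isPrefixOf]
    simpa using IH
  -- 1 :: 1 :: 1 :: t3
  have IH := ih t3.length (by simp; omega) t3 ht3 rfl
  simp only [charsOf] at IH ⊢
  simp [pyA_scan, rep, List.isPrefixOf]
  simpa using IH

lemma fold_charsOf (bs : List Int) (h : ∀ b ∈ bs, b = 0 ∨ b = 1) : ∀ (a : Int),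
    (charsOf bs).foldl (fun res c => 2 * res + (if c == '1' then 1 else 0)) a
      = bs.foldl (fun x b => 2 * x + b) a := by
  induction bs with
  | nil => intro a; simp [charsOf]
  | cons b t ih =>
    intro a
    have IH := ih (fun x hx => h x (by simp [hx]))
    rcases h b (by simp) with rfl | rfl <;>
    · simp only [charsOf, List.map_cons, List.foldl_cons] at IH ⊢
      rw [IH]
      simp

-- ===== VERDICT (by name: the statement is the Claim_ definition above) =====
theorem noConseBits_spec : Claim_equal_noConseBits := by
  intro n _
  unfold Spec_noConseBits noConseBits noConseBits_alt
  by_cases hn : n ≤ 0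
  · rw [pyA_tobinGo]
    simp only [if_pos hn, dif_neg (by omega : ¬ (0 : Int) < n)]
    rw [pyA_todecGo]
    norm_num [pyA_scan]
  · rw [if_neg hn]
    have h0 : 0 < n := by omega
    rw [tobinGo_eq]
    simp only [List.nil_append, List.reverse_reverse]
    set bs := msbBits n.toNat with hbs
    have hbits := msbBits_bits n.toNat
    have hsb : ∀ b ∈ pyA_scan bs 0, b = 0 ∨ b = 1 := scan_bits bs hbits 0
    have hlen : (pyA_scan bs 0).length = bs.length := scan_length bs 0
    have e1 : (0 : Int) + (bs.length : Int) - 1 = ((bs.length : Nat) : Int) - 1 := by ring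
    rw [e1]
    have e2 := todecGo_eq (pyA_scan bs 0) bs.length (by omega) 0 0
    norm_num at e2
    rw [e2]
    rw [← hlen, List.take_length]
    rw [toBinChars_eq n h0, replace_eq, rep_eq_scan bs hbits]
    rw [fold_charsOf (pyA_scan bs 0) hsb 0]
    rfl
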